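-- pv_equiv track=rewrite | github.com/MuteJester/AlignAIR | tokenize_sequences_multiprocessing.py | _process_and_dpad
-- ===== SOURCE A (Python) =====
-- def _process_and_dpad(sequence, max_seq_length, tokenizer_dictionary):
--     trans_seq = [tokenizer_dictionary.get(i, 0) for i in sequence]  # Use .get() to handle unknown characters
--     gap = max_seq_length - len(trans_seq)
--     iseven = gap % 2 == 0
--     whole_half_gap = gap // 2
--
--     if iseven:
--         trans_seq = [0] * whole_half_gap + trans_seq + ([0] * whole_half_gap)
--     else:
--         trans_seq = [0] * (whole_half_gap + 1) + trans_seq + ([0] * whole_half_gap)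
--
--     return trans_seq
-- ===== SOURCE B (Python) =====
-- def _process_and_dpad(sequence, max_seq_length, tokenizer_dictionary):
--     n = len(sequence)
--     size = max(max_seq_length, n)
--     left = (size - n) - (size - n) // 2  # ceil of the gap's half: extra zero goes left
--     return [tokenizer_dictionary.get(sequence[i - left], 0) if left <= i < left + n else 0
--             for i in range(size)]
-- ===== Notes on version B (the rewrite author's own statement) =====
-- stated objective: alternative
-- what changed: B builds the output by a single comprehension over output positions 0..size-1, tokenizing sequence[i-left] on the fly when the index falls inside the sequence window and emitting 0 otherwise, instead of A's staged tokenize-then-concatenate-three-lists with an even/odd branch.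
import Mathlib
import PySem

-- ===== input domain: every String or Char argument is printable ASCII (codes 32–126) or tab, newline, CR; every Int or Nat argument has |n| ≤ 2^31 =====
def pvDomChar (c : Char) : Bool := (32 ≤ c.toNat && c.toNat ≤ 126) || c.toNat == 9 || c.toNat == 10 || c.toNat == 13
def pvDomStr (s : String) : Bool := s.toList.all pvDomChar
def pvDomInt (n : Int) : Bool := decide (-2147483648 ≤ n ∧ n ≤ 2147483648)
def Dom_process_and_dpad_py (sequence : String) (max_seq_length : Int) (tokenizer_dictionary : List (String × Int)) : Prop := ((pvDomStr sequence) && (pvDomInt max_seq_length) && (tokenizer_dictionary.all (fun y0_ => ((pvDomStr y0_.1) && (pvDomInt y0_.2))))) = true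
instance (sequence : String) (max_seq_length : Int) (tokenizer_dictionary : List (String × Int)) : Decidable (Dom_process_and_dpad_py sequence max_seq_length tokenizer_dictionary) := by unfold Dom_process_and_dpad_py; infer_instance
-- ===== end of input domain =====

-- B generates the padded output by one pass over output positions, tokenizing on the fly
-- inside the sequence window and emitting 0 outside, instead of A's tokenize-then-concatenate
-- with an even/odd branch (alternative decomposition; same cost).

-- dict.get(key, 0) on the association-list representation of the dict: first match, else 0
def pvTok (d : List (String × Int)) (c : Char) : Int :=
  (((d.find? (fun p => p.1 == String.singleton c)).map Prod.snd).getD 0)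

-- ===== PORT A =====
def process_and_dpad_py (sequence : String) (max_seq_length : Int) (tokenizer_dictionary : List (String × Int)) : List Int :=
  let trans_seq := sequence.toList.map (pvTok tokenizer_dictionary)
  let gap : Int := max_seq_length - trans_seq.length
  let iseven := PySem.Int.mod gap 2 = 0
  let whole_half_gap := PySem.Int.floordiv gap 2
  -- [0] * k for a possibly negative Int k is [] in Python; Int.toNat clamps negatives to 0, so replicate k.toNat is exact
  if iseven then
    List.replicate whole_half_gap.toNat (0 : Int) ++ trans_seq ++ List.replicate whole_half_gap.toNat (0 : Int)
  else
    List.replicate (whole_half_gap + 1).toNat (0 : Int) ++ trans_seq ++ List.replicate whole_half_gap.toNat (0 : Int)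

-- ===== PORT B =====
def process_and_dpad_py_alt (sequence : String) (max_seq_length : Int) (tokenizer_dictionary : List (String × Int)) : List Int :=
  let n := sequence.toList.length
  -- size = max(max_seq_length, n) ≥ n, so the Nat subtractions and Nat division below are exact
  let size := (max max_seq_length (n : Int)).toNat
  let left := (size - n) - (size - n) / 2
  (List.range size).map (fun i =>
    if left ≤ i ∧ i < left + n then
      -- sequence[i - left]: the guard makes the index in range, so getD never uses its default
      pvTok tokenizer_dictionary (sequence.toList.getD (i - left) ' ')
    else 0)

-- ===== PRECONDITION & SPEC =====
def Spec_process_and_dpad_py (sequence : String) (max_seq_length : Int) (tokenizer_dictionary : List (String × Int)) (out : List Int) : Prop := out = process_and_dpad_py_alt sequence max_seq_length tokenizer_dictionary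
instance (sequence : String) (max_seq_length : Int) (tokenizer_dictionary : List (String × Int)) (out : List Int) : Decidable (Spec_process_and_dpad_py sequence max_seq_length tokenizer_dictionary out) := by unfold Spec_process_and_dpad_py; infer_instance

-- ===== CLAIM =====
def Claim_equal_process_and_dpad_py : Prop := ∀ (sequence : String) (max_seq_length : Int) (tokenizer_dictionary : List (String × Int)), Dom_process_and_dpad_py sequence max_seq_length tokenizer_dictionary → Spec_process_and_dpad_py sequence max_seq_length tokenizer_dictionary (process_and_dpad_py sequence max_seq_length tokenizer_dictionary)

-- ===== LEMMAS AND PROOFS =====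

-- a window-comprehension over range (L + cs.length + R) is the three-part concatenation
theorem pv_range_window (g : Char → Int) (cs : List Char) (L R : Nat) :
    (List.range (L + cs.length + R)).map (fun i =>
        if L ≤ i ∧ i < L + cs.length then g (cs.getD (i - L) ' ') else 0) =
    List.replicate L (0 : Int) ++ cs.map g ++ List.replicate R (0 : Int) := by
  apply List.ext_getElem
  · simp
    omega
  · intro i hi₁ hi₂
    simp only [List.getElem_map, List.getElem_range] at *
    rcases lt_or_ge i L with h | h
    · rw [List.getElem_append_left (by simp; omega), List.getElem_append_left (by simpa using h)]
      have : ¬ (L ≤ i ∧ i < L + cs.length) := by omega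
      simp [this, List.getElem_replicate]
    · rcases lt_or_ge i (L + cs.length) with h2 | h2
      · rw [List.getElem_append_left (by simp; omega), List.getElem_append_right (by simp [h])]
        simp only [List.length_replicate, List.getElem_map]
        have hlt : i - L < cs.length := by omega
        rw [if_pos ⟨h, h2⟩]
        congr 1
        exact List.getD_eq_getElem cs ' ' hlt
      · rw [List.getElem_append_right (by simp; omega)]
        simp only [List.length_append, List.length_replicate, List.length_map,
          List.getElem_replicate]
        have : ¬ (L ≤ i ∧ i < L + cs.length) := by omega
        simp [this]

theorem pv_spec_aux (sequence : String) (max_seq_length : Int) (tokenizer_dictionary : List (String × Int)) :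
    process_and_dpad_py sequence max_seq_length tokenizer_dictionary
      = process_and_dpad_py_alt sequence max_seq_length tokenizer_dictionary := by
  unfold process_and_dpad_py process_and_dpad_py_alt
  dsimp only
  set cs := sequence.toList with hcs
  set g := pvTok tokenizer_dictionary with hg
  rw [PySem.Int.floordiv_eq_ediv_of_pos (by norm_num), PySem.Int.mod_eq_emod_of_pos (by norm_num)]
  simp only [List.length_map]
  set n := cs.length with hn
  set size := (max max_seq_length (n : Int)).toNat with hsize
  set R := (size - n) / 2 with hR
  set L := (size - n) - R with hL
  have hsn : n ≤ size := by omega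
  have key : (List.range size).map (fun i =>
      if L ≤ i ∧ i < L + n then g (cs.getD (i - L) ' ') else 0) =
      List.replicate L (0 : Int) ++ cs.map g ++ List.replicate R (0 : Int) := by
    have hsz : size = L + n + R := by omega
    rw [hsz]
    exact pv_range_window g cs L R
  rw [key]
  by_cases hev : (max_seq_length - (n : Int)) % 2 = 0
  · simp only [hev, if_true]
    by_cases hge : (0 : Int) ≤ max_seq_length - n
    · have h1 : ((max_seq_length - (n : Int)) / 2).toNat = L := by omega
      have hRL : R = L := by omega
      rw [h1, hRL]
    · have h1 : ((max_seq_length - (n : Int)) / 2).toNat = 0 := by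
        have : (max_seq_length - (n : Int)) / 2 ≤ 0 := by omega
        omega
      have h2 : L = 0 := by omega
      have h3 : R = 0 := by omega
      rw [h1, h2, h3]
  · simp only [hev, if_false]
    by_cases hge : (0 : Int) ≤ max_seq_length - n
    · have h1 : ((max_seq_length - (n : Int)) / 2 + 1).toNat = L := by
        have := Int.mul_ediv_add_emod (max_seq_length - (n : Int)) 2
        have hm : (max_seq_length - (n : Int)) % 2 = 1 := by omega
        omega
      have h2 : ((max_seq_length - (n : Int)) / 2).toNat = R := by
        have := Int.mul_ediv_add_emod (max_seq_length - (n : Int)) 2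
        have hm : (max_seq_length - (n : Int)) % 2 = 1 := by omega
        omega
      rw [h1, h2]
    · have hneg : max_seq_length - (n : Int) < 0 := by omega
      have hm : (max_seq_length - (n : Int)) % 2 = 1 := by omega
      have := Int.mul_ediv_add_emod (max_seq_length - (n : Int)) 2
      have h1 : ((max_seq_length - (n : Int)) / 2 + 1).toNat = 0 := by omega
      have h2 : ((max_seq_length - (n : Int)) / 2).toNat = 0 := by
        have : (max_seq_length - (n : Int)) / 2 < 0 := by omega
        omega
      have h3 : L = 0 := by omega
      have h4 : R = 0 := by omega
      rw [h1, h2, h3, h4]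

-- ===== VERDICT =====
theorem process_and_dpad_py_spec : Claim_equal_process_and_dpad_py := by
  intro s m d _
  exact pv_spec_aux s m d
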